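-- pv_equiv track=rewrite | github.com/mahrens917/ci_shared | ci_tools/scripts/tool_config_guard.py | _remove_tool_sections
-- ===== SOURCE A (Python) =====
-- def _remove_tool_sections(pyproject_text: str, managed_tools: set[str]) -> str:
--     """Remove managed [tool.<name>] sections from a pyproject.toml string."""
--     lines = pyproject_text.splitlines()
--     preserved_lines = []
--     inside_tool_section = False
--
--     for line in lines:
--         stripped = line.strip()
--         if stripped.startswith("[") and stripped.endswith("]"):
--             section_name = stripped[1:-1].strip()
--             inside_tool_section = any(
--                 section_name == f"tool.{tool}"
--                 or section_name.startswith(f"tool.{tool}.")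
--                 for tool in managed_tools
--             )
--             if inside_tool_section:
--                 continue
--         if not inside_tool_section:
--             preserved_lines.append(line)
--
--     # Remove trailing blank lines to avoid runaway spacing when we append fresh config
--     while preserved_lines and not preserved_lines[-1].strip():
--         preserved_lines.pop()
--
--     return "\n".join(preserved_lines)
-- ===== SOURCE B (Python) =====
-- def _remove_tool_sections(pyproject_text: str, managed_tools: set[str]) -> str:
--     """Segment the text at bracketed headers, then drop whole managed segments."""
--     segments = []  # (section_name_or_None, its lines incl. header)
--     name, buf = None, []
--     for line in pyproject_text.splitlines():
--         stripped = line.strip()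
--         if stripped.startswith("[") and stripped.endswith("]"):
--             segments.append((name, buf))
--             name, buf = stripped[1:-1].strip(), [line]
--         else:
--             buf.append(line)
--     segments.append((name, buf))
--
--     def managed(sec):
--         return sec is not None and any(
--             sec == f"tool.{t}" or sec.startswith(f"tool.{t}.") for t in managed_tools
--         )
--
--     flat = [ln for sec, seg_lines in segments if not managed(sec) for ln in seg_lines]
--     n = len(flat)
--     while n and not flat[n - 1].strip():
--         n -= 1
--     return "\n".join(flat[:n])
-- ===== Notes on version B (the rewrite author's own statement) =====
-- stated objective: alternative
-- what changed: Replaced A's single-pass scan with a per-line inside-section boolean flag by a two-pass decomposition: first split the lines into header-delimited segments tagged with their section name, then filter out whole managed segments and flatten, trimming trailing blanks via reverse/dropwhile.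
import Mathlib
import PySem

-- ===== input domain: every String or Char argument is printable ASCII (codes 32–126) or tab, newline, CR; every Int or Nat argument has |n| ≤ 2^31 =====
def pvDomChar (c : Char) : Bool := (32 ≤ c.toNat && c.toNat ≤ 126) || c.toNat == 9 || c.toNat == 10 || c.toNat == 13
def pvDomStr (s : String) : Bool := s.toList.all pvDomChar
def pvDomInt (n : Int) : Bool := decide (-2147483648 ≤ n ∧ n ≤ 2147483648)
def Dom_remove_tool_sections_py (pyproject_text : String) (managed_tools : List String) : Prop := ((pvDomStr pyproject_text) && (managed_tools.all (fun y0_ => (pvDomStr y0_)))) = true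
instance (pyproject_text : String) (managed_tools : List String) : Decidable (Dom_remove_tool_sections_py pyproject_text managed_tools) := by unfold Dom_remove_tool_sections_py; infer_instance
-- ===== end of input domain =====

-- B re-decomposes A's flag-based line scan into a two-pass segment build + filter (objective: alternative, same cost).


-- ===== PORT A =====
-- the body of A's for-loop, step for step (header test, section-name extraction, flag update, conditional append)
def stepA (managed_tools : List String) (st : List String × Bool) (line : String) : List String × Bool :=
  if PySem.Str.startswith (PySem.Str.strip line) "[" && PySem.Str.endswith (PySem.Str.strip line) "]" then
    if managed_tools.any (fun tool =>
        PySem.Str.strip (PySem.Str.slice (PySem.Str.strip line) (some 1) (some (-1))) == "tool." ++ tool ||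
        PySem.Str.startswith (PySem.Str.strip (PySem.Str.slice (PySem.Str.strip line) (some 1) (some (-1))))
          ("tool." ++ tool ++ ".")) then
      (st.1, true)
    else
      (st.1 ++ [line], false)
  else
    if !st.2 then (st.1 ++ [line], st.2) else st

-- A's while-pop of trailing blank lines, from the back
def trimTrailingBlanksA (xs : List String) : List String :=
  match h : xs.getLast? with
  | some l => if PySem.Str.strip l == "" then trimTrailingBlanksA xs.dropLast else xs
  | none => xs
termination_by xs.length
decreasing_by
  have hne : xs ≠ [] := by intro he; subst he; simp at h
  have hpos : 0 < xs.length := List.length_pos_of_ne_nil hne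
  simp only [List.length_dropLast]
  omega

def remove_tool_sections_py (pyproject_text : String) (managed_tools : List String) : String :=
  let st := (PySem.Str.splitlines pyproject_text).foldl (stepA managed_tools) ([], false)
  PySem.Str.join "\n" (trimTrailingBlanksA st.1)

-- ===== PORT B =====
def isHeaderB (line : String) : Bool :=
  PySem.Str.startswith (PySem.Str.strip line) "[" && PySem.Str.endswith (PySem.Str.strip line) "]"

def sectionNameB (line : String) : String :=
  PySem.Str.strip (PySem.Str.slice (PySem.Str.strip line) (some 1) (some (-1)))

def managedB (managed_tools : List String) (sec : Option String) : Bool :=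
  match sec with
  | none => false
  | some s => managed_tools.any (fun tool =>
      s == "tool." ++ tool || PySem.Str.startswith s ("tool." ++ tool ++ "."))

-- B's segmenting loop body: a header closes the current segment and opens a named one
def stepB (st : List (Option String × List String) × Option String × List String) (line : String) :
    List (Option String × List String) × Option String × List String :=
  if isHeaderB line then (st.1 ++ [(st.2.1, st.2.2)], some (sectionNameB line), [line])
  else (st.1, st.2.1, st.2.2 ++ [line])

def remove_tool_sections_py_alt (pyproject_text : String) (managed_tools : List String) : String :=
  let st := (PySem.Str.splitlines pyproject_text).foldl stepB ([], none, [])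
  let segments := st.1 ++ [(st.2.1, st.2.2)]
  let flat := (segments.filter (fun p => !managedB managed_tools p.1)).flatMap (·.2)
  PySem.Str.join "\n" (flat.reverse.dropWhile (fun l => PySem.Str.strip l == "")).reverse

-- ===== PRECONDITION & SPEC =====
def Spec_remove_tool_sections_py (pyproject_text : String) (managed_tools : List String) (out : String) : Prop := out = remove_tool_sections_py_alt pyproject_text managed_tools
instance (pyproject_text : String) (managed_tools : List String) (out : String) : Decidable (Spec_remove_tool_sections_py pyproject_text managed_tools out) := by unfold Spec_remove_tool_sections_py; infer_instance

-- ===== CLAIM (what is proved, stated in full; the proofs are below) =====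
def Claim_equal_remove_tool_sections_py : Prop := ∀ (pyproject_text : String) (managed_tools : List String), Dom_remove_tool_sections_py pyproject_text managed_tools → Spec_remove_tool_sections_py pyproject_text managed_tools (remove_tool_sections_py pyproject_text managed_tools)

-- ===== LEMMAS AND PROOFS =====

-- the kept lines contributed by a list of closed segments
def flatOf (tools : List String) (segs : List (Option String × List String)) : List String :=
  (segs.filter (fun p => !managedB tools p.1)).flatMap (·.2)

lemma flatOf_append (tools : List String) (s t : List (Option String × List String)) :
    flatOf tools (s ++ t) = flatOf tools s ++ flatOf tools t := by
  simp [flatOf, List.filter_append]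

lemma flatOf_single (tools : List String) (name : Option String) (buf : List String) :
    flatOf tools [(name, buf)] = if managedB tools name then [] else buf := by
  by_cases h : managedB tools name <;> simp [flatOf, h]

-- loop invariant: A's scan state is determined by B's segmentation state
lemma loop_inv (tools : List String) (lines : List String) :
    ∀ (segs : List (Option String × List String)) (name : Option String) (buf : List String),
    lines.foldl (stepA tools)
      (flatOf tools segs ++ (if managedB tools name then [] else buf), managedB tools name)
    = (flatOf tools ((lines.foldl stepB (segs, name, buf)).1)
         ++ (if managedB tools ((lines.foldl stepB (segs, name, buf)).2.1) then []
             else (lines.foldl stepB (segs, name, buf)).2.2),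
       managedB tools ((lines.foldl stepB (segs, name, buf)).2.1)) := by
  induction lines with
  | nil => intro segs name buf; rfl
  | cons line rest ih =>
    intro segs name buf
    rw [List.foldl_cons, List.foldl_cons]
    by_cases h : isHeaderB line = true
    · have hB : stepB (segs, name, buf) line
          = (segs ++ [(name, buf)], some (sectionNameB line), [line]) := by
        simp [stepB, h]
      have hA : stepA tools
          (flatOf tools segs ++ (if managedB tools name then [] else buf), managedB tools name) line
          = (flatOf tools (segs ++ [(name, buf)])
               ++ (if managedB tools (some (sectionNameB line)) then [] else [line]),
             managedB tools (some (sectionNameB line))) := by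
        have h' : (PySem.Str.startswith (PySem.Str.strip line) "[" &&
            PySem.Str.endswith (PySem.Str.strip line) "]") = true := h
        rw [stepA, if_pos h']
        rw [flatOf_append, flatOf_single, List.append_assoc]
        by_cases hm : managedB tools (some (sectionNameB line)) = true
        · have hm' := hm
          simp only [managedB, sectionNameB] at hm'
          rw [if_pos hm', if_pos hm]
          simp [hm]
        · have hm' : tools.any (fun tool =>
              PySem.Str.strip (PySem.Str.slice (PySem.Str.strip line) (some 1) (some (-1))) == "tool." ++ tool ||
              PySem.Str.startswith (PySem.Str.strip (PySem.Str.slice (PySem.Str.strip line) (some 1) (some (-1))))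
                ("tool." ++ tool ++ ".")) = false := by
            simpa [managedB, sectionNameB] using hm
          rw [if_neg (by intro hc; rw [hm'] at hc; cases hc), if_neg hm]
          simp [List.append_assoc, (Bool.not_eq_true _).mp hm]
      rw [hA, hB]
      exact ih (segs ++ [(name, buf)]) (some (sectionNameB line)) [line]
    · have hB : stepB (segs, name, buf) line = (segs, name, buf ++ [line]) := by
        simp [stepB, h]
      have hA : stepA tools
          (flatOf tools segs ++ (if managedB tools name then [] else buf), managedB tools name) line
          = (flatOf tools segs ++ (if managedB tools name then [] else buf ++ [line]),
             managedB tools name) := by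
        have h' : (PySem.Str.startswith (PySem.Str.strip line) "[" &&
            PySem.Str.endswith (PySem.Str.strip line) "]") = false := by
          simpa [isHeaderB] using h
        rw [stepA, if_neg (by intro hc; rw [h'] at hc; cases hc)]
        by_cases hm : managedB tools name = true
        · simp [hm]
        · simp [Bool.eq_false_iff.mp (by simpa using hm)]
      rw [hA, hB]
      exact ih segs name (buf ++ [line])

-- B's final flatten over open state, expressed through flatOf
lemma final_flat (tools : List String)
    (st : List (Option String × List String) × Option String × List String) :
    ((st.1 ++ [(st.2.1, st.2.2)]).filter (fun p => !managedB tools p.1)).flatMap (fun x => x.2)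
      = flatOf tools st.1 ++ (if managedB tools st.2.1 then [] else st.2.2) := by
  have : ((st.1 ++ [(st.2.1, st.2.2)]).filter (fun p => !managedB tools p.1)).flatMap (fun x => x.2)
      = flatOf tools (st.1 ++ [(st.2.1, st.2.2)]) := rfl
  rw [this, flatOf_append, flatOf_single]

-- A's back-to-front while-pop equals B's reverse/dropWhile/reverse
lemma trim_eq (xs : List String) :
    trimTrailingBlanksA xs
      = (xs.reverse.dropWhile (fun l => PySem.Str.strip l == "")).reverse := by
  induction xs using List.reverseRecOn with
  | nil => rw [trimTrailingBlanksA.eq_def]; simp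
  | append_singleton ys l ih =>
    rw [trimTrailingBlanksA.eq_def]
    split
    next l' heq =>
      rw [List.getLast?_concat] at heq
      obtain rfl : l = l' := by simpa using heq
      simp only [List.reverse_append, List.reverse_singleton, List.singleton_append,
        List.dropWhile_cons]
      by_cases hb : (PySem.Str.strip l == "") = true
      · simp [hb, ih]
      · simp [hb]
    next heq =>
      rw [List.getLast?_concat] at heq
      simp at heq

-- ===== VERDICT (by name: the statement is the Claim_ definition above) =====
theorem remove_tool_sections_py_spec : Claim_equal_remove_tool_sections_py := by
  intro pyproject_text managed_tools _
  show remove_tool_sections_py pyproject_text managed_tools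
      = remove_tool_sections_py_alt pyproject_text managed_tools
  simp only [remove_tool_sections_py, remove_tool_sections_py_alt]
  rw [trim_eq,
    final_flat managed_tools (List.foldl stepB ([], none, []) (PySem.Str.splitlines pyproject_text))]
  have h0 : (([] : List String), false)
      = (flatOf managed_tools [] ++ (if managedB managed_tools none then [] else ([] : List String)),
         managedB managed_tools none) := rfl
  rw [h0, loop_inv managed_tools (PySem.Str.splitlines pyproject_text) [] none []]
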